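-- pv_equiv track=rewrite | github.com/yukikongju/LeetCodeTraining | LeetCodePython/2177-FindThreeConsecutiveIntegersThatSumToAGivenNumber-HardSlidingWindow.py | sumOfThree
-- ===== SOURCE A (Python) =====
-- from typing import List
--
-- def sumOfThree(num: int) -> List[int]:
--     # solution: hard sliding window O(n)
--
--     # base case: less than [0,1,2]
--     if num < 3:
--         return []
--
--     WINDOW_LENGTH = 3
--     sol = []
--     csum = 3
--     current = 3
--     while csum < num:
--         prev, suiv = current - WINDOW_LENGTH + 1, current + 1
--         csum += suiv - prev
--         current += 1
--
--     return [] if csum != num else [n for n in range(current - WINDOW_LENGTH, current)]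
-- ===== SOURCE B (Python) =====
-- from typing import List
--
-- def sumOfThree(num: int) -> List[int]:
--     # O(1) arithmetic: the answer exists iff num is a multiple of three
--     # that is at least the smallest window sum, with middle element num // 3.
--     if num >= 3 and num % 3 == 0:
--         k = num // 3
--         return [k - 1, k, k + 1]
--     return []
-- ===== Notes on version B (the rewrite author's own statement) =====
-- stated objective: faster
-- what changed: Replaced the O(num) sliding-window loop by a closed-form divisibility test: num is a sum of three consecutive integers iff num>=3 and num%3==0, with middle element num//3.
import Mathlib
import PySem

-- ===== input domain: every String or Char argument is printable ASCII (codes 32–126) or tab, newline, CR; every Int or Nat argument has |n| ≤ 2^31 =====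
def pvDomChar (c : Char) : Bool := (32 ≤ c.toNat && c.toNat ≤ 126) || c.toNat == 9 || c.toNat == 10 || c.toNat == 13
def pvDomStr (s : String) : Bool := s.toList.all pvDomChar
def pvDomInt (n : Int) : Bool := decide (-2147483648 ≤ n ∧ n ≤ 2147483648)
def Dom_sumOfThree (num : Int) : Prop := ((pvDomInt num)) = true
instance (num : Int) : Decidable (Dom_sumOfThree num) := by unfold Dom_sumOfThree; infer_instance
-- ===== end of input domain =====

-- B replaces A's O(num) sliding-window loop by the O(1) divisibility test num % 3 == 0.

-- ===== PORT A =====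
-- the 'while csum < num' loop; terminates because csum grows by 3 each pass
def sumOfThreeLoop (num csum current : Int) : Int × Int :=
  if csum < num then
    let prev := current - 3 + 1
    let suiv := current + 1
    sumOfThreeLoop num (csum + (suiv - prev)) (current + 1)
  else (csum, current)
termination_by (num - csum).toNat
decreasing_by omega

def sumOfThree (num : Int) : List Int :=
  if num < 3 then []
  else
    let r := sumOfThreeLoop num 3 3
    let csum := r.1
    let current := r.2
    if csum ≠ num then [] else PySem.List.pyRange (current - 3) current 1

-- ===== PORT B =====
def sumOfThree_alt (num : Int) : List Int :=
  if num ≥ 3 ∧ PySem.Int.mod num 3 = 0 then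
    let k := PySem.Int.floordiv num 3
    [k - 1, k, k + 1]
  else []

-- ===== PRECONDITION & SPEC =====
def Spec_sumOfThree (num : Int) (out : List Int) : Prop := out = sumOfThree_alt num
instance (num : Int) (out : List Int) : Decidable (Spec_sumOfThree num out) := by unfold Spec_sumOfThree; infer_instance

-- ===== CLAIM (what is proved, stated in full; the proofs are below) =====
def Claim_equal_sumOfThree : Prop := ∀ (num : Int), Dom_sumOfThree num → Spec_sumOfThree num (sumOfThree num)

-- ===== LEMMAS AND PROOFS =====

-- the loop preserves csum mod 3
lemma sumOfThreeLoop_mod (num c cur : Int) : (sumOfThreeLoop num c cur).1 % 3 = c % 3 := by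
  fun_induction sumOfThreeLoop with
  | case1 c cur h prev suiv ih => simp only [suiv, prev] at ih ⊢; rw [ih]; omega
  | case2 c cur h => rfl

-- on a multiple-of-3 gap the loop lands exactly on num
lemma sumOfThreeLoop_eq (num c cur : Int) :
    c ≤ num → (num - c) % 3 = 0 → sumOfThreeLoop num c cur = (num, cur + (num - c) / 3) := by
  fun_induction sumOfThreeLoop with
  | case1 c cur h prev suiv ih =>
    intro h1 h2
    simp only [suiv, prev] at ih ⊢
    rw [ih (by omega) (by omega)]
    simp only [Prod.mk.injEq]
    exact ⟨trivial, by omega⟩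
  | case2 c cur h =>
    intro h1 h2
    have hc : c = num := by omega
    subst hc
    simp only [Prod.mk.injEq]
    exact ⟨trivial, by omega⟩

-- ===== VERDICT (by name: the statement is the Claim_ definition above) =====
theorem sumOfThree_spec : Claim_equal_sumOfThree := by
  unfold Claim_equal_sumOfThree
  intro num _
  unfold Spec_sumOfThree sumOfThree sumOfThree_alt
  have hmd : PySem.Int.mod num 3 = num % 3 := PySem.Int.mod_eq_emod_of_pos (by norm_num)
  by_cases hlt : num < 3
  · rw [if_pos hlt, if_neg]
    rintro ⟨h, -⟩; omega
  · rw [if_neg hlt]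
    have h3 : (3 : Int) ≤ num := by omega
    by_cases hm : num % 3 = 0
    · rw [sumOfThreeLoop_eq num 3 3 h3 (by omega)]
      rw [if_neg (by simp), if_pos ⟨h3, by omega⟩]
      have hfd : PySem.Int.floordiv num 3 = num / 3 := PySem.Int.floordiv_eq_ediv_of_pos (by norm_num)
      rw [hfd]
      rw [PySem.List.pyRange_one_cons (by omega), PySem.List.pyRange_one_cons (by omega),
          PySem.List.pyRange_one_cons (by omega), PySem.List.pyRange_one_eq_nil (by omega)]
      have e1 : (3 : Int) + (num - 3) / 3 - 3 = num / 3 - 1 := by omega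
      rw [e1]
      norm_num
    · have hmod := sumOfThreeLoop_mod num 3 3
      rw [if_pos (by omega), if_neg]
      rintro ⟨-, hc⟩
      omega
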